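-- pv_equiv track=rewrite | github.com/AKleriX/codewars-tasks | Become The Ultimate Phychic/task-solution.py | guess_it
-- ===== SOURCE A (Python) =====
-- def guess_it(n, m):
--     s = m - 3 * n
--     ans = []
--     for green in range(n + 1):
--         red = s - 2 * green
--         blue = n - green - red
--         if red >= 0 and blue >= 0:
--             ans.append([green, red, blue])
--     return ans
-- ===== SOURCE B (Python) =====
-- def guess_it(n, m):
--     s = m - 3 * n
--     lo = max(0, s - n)
--     hi = min(n, s // 2)
--     return [[g, s - 2 * g, n + g - s] for g in range(lo, hi + 1)]
-- ===== Notes on version B (the rewrite author's own statement) =====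
-- stated objective: faster
-- what changed: Instead of scanning all n+1 green values and testing red/blue nonnegativity per iteration, B computes the valid green interval [max(0,s-n), min(n,s//2)] in closed form and emits triples only over that interval (output-sensitive, no filtering).
import Mathlib
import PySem

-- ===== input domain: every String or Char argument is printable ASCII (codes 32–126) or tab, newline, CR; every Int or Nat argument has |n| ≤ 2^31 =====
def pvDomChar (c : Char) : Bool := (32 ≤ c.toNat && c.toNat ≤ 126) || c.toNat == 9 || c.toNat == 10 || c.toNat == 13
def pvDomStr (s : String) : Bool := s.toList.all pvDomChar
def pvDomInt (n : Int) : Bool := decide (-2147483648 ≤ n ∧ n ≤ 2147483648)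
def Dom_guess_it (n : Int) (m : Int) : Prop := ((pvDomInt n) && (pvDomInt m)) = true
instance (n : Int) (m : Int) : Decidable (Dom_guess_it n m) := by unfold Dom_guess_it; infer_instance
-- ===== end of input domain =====

-- B replaces A's scan-and-filter over all green in [0, n] by emitting the valid green interval directly (faster, output-sensitive).

-- ===== PORT A =====
def guess_it (n : Int) (m : Int) : List (List Int) :=
  let s := m - 3 * n
  (PySem.List.pyRange 0 (n + 1) 1).foldl
    (fun ans green =>
      let red := s - 2 * green
      let blue := n - green - red
      if red ≥ 0 ∧ blue ≥ 0 then ans ++ [[green, red, blue]] else ans)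
    []

-- ===== PORT B =====
def guess_it_alt (n : Int) (m : Int) : List (List Int) :=
  let s := m - 3 * n
  let lo := max 0 (s - n)
  let hi := min n (PySem.Int.floordiv s 2)
  (PySem.List.pyRange lo (hi + 1) 1).map (fun g => [g, s - 2 * g, n + g - s])

-- ===== PRECONDITION & SPEC =====
def Spec_guess_it (n : Int) (m : Int) (out : List (List Int)) : Prop := out = guess_it_alt n m
instance (n : Int) (m : Int) (out : List (List Int)) : Decidable (Spec_guess_it n m out) := by unfold Spec_guess_it; infer_instance

-- ===== CLAIM (what is proved, stated in full; the proofs are below) =====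
def Claim_equal_guess_it : Prop := ∀ (n : Int) (m : Int), Dom_guess_it n m → Spec_guess_it n m (guess_it n m)

-- ===== LEMMAS AND PROOFS =====

-- Filtering an int range by membership in an interval yields the intersected range.
theorem filter_pyRange_interval (a b lo hi : Int) :
    (PySem.List.pyRange a b 1).filter (fun g => decide (lo ≤ g ∧ g ≤ hi))
      = PySem.List.pyRange (max a lo) (min b (hi + 1)) 1 := by
  apply List.Perm.eq_of_pairwise (le := (· ≤ ·))
  · intro x y _ _ h1 h2; omega
  · exact ((PySem.List.pairwise_lt_pyRange_one a b).filter _).imp le_of_lt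
  · exact (PySem.List.pairwise_lt_pyRange_one _ _).imp le_of_lt
  · rw [List.perm_ext_iff_of_nodup
      ((PySem.List.nodup_pyRange_one a b).filter _) (PySem.List.nodup_pyRange_one _ _)]
    intro x
    simp only [List.mem_filter, PySem.List.mem_pyRange_one, decide_eq_true_eq]
    omega

theorem guess_it_eq_alt (n m : Int) : guess_it n m = guess_it_alt n m := by
  unfold guess_it guess_it_alt
  set s := m - 3 * n with hs
  have hcond : ∀ g : Int,
      (s - 2 * g ≥ 0 ∧ n - g - (s - 2 * g) ≥ 0) ↔ (s - n ≤ g ∧ g ≤ PySem.Int.floordiv s 2) := by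
    intro g
    have h2 : g ≤ PySem.Int.floordiv s 2 ↔ g * 2 ≤ s :=
      PySem.Int.le_floordiv_iff_mul_le (by omega)
    constructor <;> intro h
    · exact ⟨by omega, h2.mpr (by omega)⟩
    · have := h2.mp h.2; omega
  have hfold : (PySem.List.pyRange 0 (n + 1) 1).foldl
      (fun ans green =>
        if s - 2 * green ≥ 0 ∧ n - green - (s - 2 * green) ≥ 0
        then ans ++ [[green, s - 2 * green, n - green - (s - 2 * green)]] else ans) []
      = [] ++ ((PySem.List.pyRange 0 (n + 1) 1).filter
          (fun g => decide (s - n ≤ g ∧ g ≤ PySem.Int.floordiv s 2))).map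
          (fun g => [g, s - 2 * g, n - g - (s - 2 * g)]) := by
    rw [← PySem.List.foldl_append_if]
    apply PySem.List.foldl_congr_mem
    intro acc g _
    simp only [decide_eq_true_eq]
    rw [if_congr (hcond g) rfl rfl]
  simp only []
  rw [hfold, List.nil_append, filter_pyRange_interval]
  have hmin : min (n + 1) (PySem.Int.floordiv s 2 + 1) = min n (PySem.Int.floordiv s 2) + 1 := by
    omega
  rw [max_comm, hmin]
  apply List.map_congr_left
  intro g _
  have : n - g - (s - 2 * g) = n + g - s := by ring
  rw [this]

-- ===== VERDICT (by name: the statement is the Claim_ definition above) =====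
theorem guess_it_spec : Claim_equal_guess_it := by
  intro n m _
  exact guess_it_eq_alt n m
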